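-- pv_equiv track=rewrite | github.com/Brainivore/Hunspell-Dictionaries | GenListWords.py | respectRuleSuffix
-- ===== SOURCE A (Python) =====
-- def respectRuleSuffix(word,rule):
--     #Check if the end of the word respect the rule
--     k=len(rule)-1
--     i=len(word)-1
--     respect = True
--     while respect and k>=0 and i>=0:
--         if (rule[k]!="]" and rule[k]!="."):
--             #Condition given by a specific letter
--             if (word[i]!=rule[k]):
--                 respect = False
--         elif rule[k]=="]":
--             #Set of letter to have or to avoid
--             listLetters=[]
--             k-=1
--             while rule[k]!="[":
--                 if (rule[k]!="^"):
--                     listLetters.append(rule[k])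
--                 k-=1
--             #ListLetters contains the letter to have or to avoid
--             if rule[k+1]=="^" and word[i] in listLetters:
--                 respect = False
--             elif rule[k+1]!="^" and not word[i] in listLetters:
--                 respect=False
--         i-=1;
--         k-=1;
--     return respect and (i>=0 or (i==-1 and k==-1))
-- ===== SOURCE B (Python) =====
-- def respectRuleSuffix(word, rule):
--     # Two-phase: tokenize the rule right-to-left, then match tokens against the word's tail.
--     toks = []
--     k = len(rule) - 1
--     while k >= 0:
--         c = rule[k]
--         if c == ']':
--             j = rule.rfind('[', 0, k)
--             if j < 0:
--                 raise ValueError("unmatched ']' in rule")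
--             letters = [ch for ch in rule[j + 1:k] if ch != '^']
--             toks.append(('cls', rule[j + 1] == '^', letters))
--             k = j - 1
--         elif c == '.':
--             toks.append(('any',))
--             k -= 1
--         else:
--             toks.append(('lit', c))
--             k -= 1
--     if len(toks) > len(word):
--         return False
--     i = len(word) - 1
--     for t in toks:
--         c = word[i]
--         if t[0] == 'lit':
--             if c != t[1]:
--                 return False
--         elif t[0] == 'cls':
--             if (c in t[2]) == t[1]:
--                 return False
--         i -= 1
--     return True
-- ===== Notes on version B (the rewrite author's own statement) =====
-- stated objective: alternative
-- what changed: Replaces the single backward while-loop that interleaves bracket parsing with matching by a two-phase algorithm: first tokenize the rule right-to-left into literal/wildcard/class tokens (classes located with str.rfind and a slice), then walk the token list against the word's trailing characters.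
-- outside the precondition, e.g. on respectRuleSuffix('a', ']x'): A returns False, B raises ValueError; on respectRuleSuffix('aa[a', '][a'): A returns True, B raises ValueError
import Mathlib
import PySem

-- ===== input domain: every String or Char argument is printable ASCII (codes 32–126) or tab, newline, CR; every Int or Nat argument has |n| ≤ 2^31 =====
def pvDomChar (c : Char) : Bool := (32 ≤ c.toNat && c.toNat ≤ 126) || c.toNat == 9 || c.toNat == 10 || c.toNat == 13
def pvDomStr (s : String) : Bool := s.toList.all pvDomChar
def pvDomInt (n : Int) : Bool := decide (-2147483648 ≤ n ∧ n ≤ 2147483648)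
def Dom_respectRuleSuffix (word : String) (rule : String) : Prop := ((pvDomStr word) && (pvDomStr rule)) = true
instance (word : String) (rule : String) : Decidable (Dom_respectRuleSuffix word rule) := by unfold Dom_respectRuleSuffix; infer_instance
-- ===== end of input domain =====

-- B replaces A's single backward while-loop (which interleaves bracket parsing with matching)
-- by a two-phase algorithm: tokenize the rule right-to-left, then match the tokens against the
-- word's trailing characters. Same cost; equality proved on well-bracketed rules (Pre_).
-- (The Nat `fuel` arguments below are totality guards only: every call site passes more fuel
-- than the loop they transcribe can consume, so the 0-fuel arm is never reached.)

-- ===== PORT A =====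
-- A's inner `while rule[k]!="[":` scan, collecting class letters going left (skipping '^').
-- `none` = Python IndexError (k ran past -len(rule) via negative-index wraparound).
def scanA (rule : List Char) : Nat → Int → List Char → Option (Int × List Char)
  | 0, _, _ => none   -- fuel guard, never reached (callers pass fuel > all possible steps)
  | fuel + 1, k, letters =>
    match PySem.List.pyGet? rule k with
    | none => none
    | some c =>
      if c = '[' then some (k, letters)
      else scanA rule fuel (k - 1) (if c = '^' then letters else letters ++ [c])

-- A's outer while-loop; `respect`, `k`, `i` are the loop state (i drops by 1 per iteration,
-- so fuel > i + 1 suffices).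
def loopA (word rule : List Char) : Nat → Bool → Int → Int → Bool
  | 0, _, _, _ => false   -- fuel guard, never reached
  | fuel + 1, respect, k, i =>
    if respect = true ∧ 0 ≤ k ∧ 0 ≤ i then
      match PySem.List.pyGet? rule k, PySem.List.pyGet? word i with
      | some rc, some wc =>
        if rc ≠ ']' ∧ rc ≠ '.' then
          loopA word rule fuel (decide (wc = rc)) (k - 1) (i - 1)
        else if rc = ']' then
          match scanA rule (2 * rule.length + 2) (k - 1) [] with
          | none => false   -- Python raises IndexError here; outside Pre_
          | some (k', letters) =>
            let resp : Bool :=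
              if PySem.List.pyGet? rule (k' + 1) = some '^' ∧ letters.contains wc then false
              else if ¬ PySem.List.pyGet? rule (k' + 1) = some '^' ∧ ¬ letters.contains wc = true then false
              else true
            loopA word rule fuel resp (k' - 1) (i - 1)
        else loopA word rule fuel respect (k - 1) (i - 1)
      | _, _ => false   -- unreachable when k,i index into the strings (0 ≤ k,i < length)
    else
      respect && (decide (0 ≤ i) || (decide (i = -1) && decide (k = -1)))

def respectRuleSuffix (word : String) (rule : String) : Bool :=
  loopA word.toList rule.toList (word.toList.length + 1) true
    ((rule.toList.length : Int) - 1) ((word.toList.length : Int) - 1)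

-- ===== PORT B =====
-- hand-port of Python's rule.rfind('[', 0, j+1): greatest index ≤ j holding '['; exact because it
-- is only called with j < len(rule) (none ≙ rfind's -1 result).
def rfindBracket (rule : List Char) : Nat → Int → Option Int
  | 0, _ => none   -- fuel guard, never reached
  | fuel + 1, j =>
    if 0 ≤ j then
      if PySem.List.pyGet? rule j = some '[' then some j else rfindBracket rule fuel (j - 1)
    else none

inductive TokB : Type where
  | lit (c : Char)
  | any
  | cls (neg : Bool) (letters : List Char)
deriving DecidableEq, Repr

-- phase 1: the token list, rightmost token first; `none` = Python's ValueError (unmatched ']').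
def tokenizeB (rule : List Char) : Nat → Int → Option (List TokB)
  | 0, _ => none   -- fuel guard, never reached
  | fuel + 1, k =>
    if 0 ≤ k then
      match PySem.List.pyGet? rule k with
      | none => some []   -- unreachable when k < len(rule)
      | some c =>
        if c = ']' then
          match rfindBracket rule (rule.length + 1) (k - 1) with
          | none => none
          | some j =>
            (tokenizeB rule fuel (j - 1)).map
              (TokB.cls (PySem.List.pyGet? rule (j + 1) = some '^')
                 ((PySem.List.slice rule (some (j + 1)) (some k)).filter (· ≠ '^')) :: ·)
        else if c = '.' then (tokenizeB rule fuel (k - 1)).map (TokB.any :: ·)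
        else (tokenizeB rule fuel (k - 1)).map (TokB.lit c :: ·)
    else some []

-- phase 2, one token's test against an (optional) word character
def chkTok (t : TokB) (oc : Option Char) : Bool :=
  match oc with
  | none => false   -- unreachable: the length guard keeps i in range
  | some c =>
    match t with
    | TokB.lit a => c = a
    | TokB.any => true
    | TokB.cls neg letters => !(letters.contains c == neg)

-- phase 2: B's for-loop over the tokens, i walking the word from its end
def matchToks (word : List Char) (toks : List TokB) (i : Int) : Bool :=
  match toks with
  | [] => true
  | t :: ts => chkTok t (PySem.List.pyGet? word i) && matchToks word ts (i - 1)

def respectRuleSuffix_alt (word : String) (rule : String) : Bool :=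
  match tokenizeB rule.toList (rule.toList.length + 1) ((rule.toList.length : Int) - 1) with
  | none => false   -- Python B raises ValueError; outside Pre_
  | some toks =>
    if (word.toList.length : Int) < (toks.length : Int) then false
    else matchToks word.toList toks ((word.toList.length : Int) - 1)

-- ===== PRECONDITION & SPEC =====
-- Pre_ excludes rules containing a ']' with no '[' anywhere before it: on those A's backward
-- class scan wraps around via Python negative indexing and either raises IndexError or returns
-- an accidental value, while B's tokenizer raises ValueError; everything else is admitted.
def Pre_respectRuleSuffix (word : String) (rule : String) : Prop :=
  ∀ p : Nat, (h : p < rule.toList.length) → rule.toList[p] = ']' → '[' ∈ rule.toList.take p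
instance (word : String) (rule : String) : Decidable (Pre_respectRuleSuffix word rule) := by
  unfold Pre_respectRuleSuffix; infer_instance

def pvWitness_respectRuleSuffix : String × String := ("hello", "l[lo]")

def Spec_respectRuleSuffix (word : String) (rule : String) (out : Bool) : Prop := out = respectRuleSuffix_alt word rule
instance (word : String) (rule : String) (out : Bool) : Decidable (Spec_respectRuleSuffix word rule out) := by unfold Spec_respectRuleSuffix; infer_instance

-- ===== CLAIM (what is proved, stated in full; the proofs are below) =====
def Claim_equal_respectRuleSuffix : Prop := ∀ (word : String) (rule : String), Dom_respectRuleSuffix word rule → Pre_respectRuleSuffix word rule → Spec_respectRuleSuffix word rule (respectRuleSuffix word rule)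

-- ===== LEMMAS AND PROOFS =====

theorem rfindBracket_le (rule : List Char) :
    ∀ (fuel : Nat) (j j' : Int), rfindBracket rule fuel j = some j' → 0 ≤ j' ∧ j' ≤ j := by
  intro fuel
  induction fuel with
  | zero => intro j j' h; simp [rfindBracket] at h
  | succ fuel ih =>
    intro j j' h
    rw [rfindBracket] at h
    by_cases hj : 0 ≤ j
    · simp only [hj, if_true] at h
      by_cases hb : PySem.List.pyGet? rule j = some '['
      · simp [hb] at h; omega
      · simp only [hb, if_false] at h
        have := ih (j - 1) j' h
        omega
    · simp [hj] at h

-- proof-layer well-formedness of the rule from position k leftwards (the shape A's scan needs)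
def wfFrom (rule : List Char) (k : Int) : Bool :=
  if hk : 0 ≤ k then
    match PySem.List.pyGet? rule k with
    | none => true
    | some c =>
      if c = ']' then
        match hj : rfindBracket rule (rule.length + 1) (k - 1) with
        | none => false
        | some j => wfFrom rule (j - 1)
      else wfFrom rule (k - 1)
  else true
termination_by (k + 1).toNat
decreasing_by
  all_goals first
    | omega
    | (have := rfindBracket_le rule (rule.length + 1) (k - 1) j hj; omega)

-- Pre_'s closed-form bracket condition makes rfindBracket succeed …
theorem rfindBracket_some_of_mem (rule : List Char) :
    ∀ (fuel : Nat) (m : Int), (m + 1).toNat < fuel → 0 ≤ m → m < (rule.length : Int) →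
      '[' ∈ rule.take (m.toNat + 1) → ∃ j, rfindBracket rule fuel m = some j := by
  intro fuel
  induction fuel with
  | zero => intro m hn hm0 _ _; omega
  | succ fuel ih =>
    intro m hn hm0 hmlen hmem
    have hget : PySem.List.pyGet? rule m = some rule[m.toNat] :=
      PySem.List.pyGet?_eq_some_getElem rule hm0 hmlen
    by_cases hb : rule[m.toNat] = '['
    · exact ⟨m, by rw [rfindBracket, if_pos hm0, hget, if_pos (by rw [hb])]⟩
    · have hm1 : 0 < m ∨ m = 0 := by omega
      rcases hm1 with hm1 | hm1
      · have htk : rule.take (m.toNat + 1) = rule.take m.toNat ++ [rule[m.toNat]] := by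
          rw [List.take_succ, List.getElem?_eq_getElem (by omega)]
          rfl
        rw [htk, List.mem_append] at hmem
        rcases hmem with hmem | hmem
        · have hmem' : '[' ∈ rule.take ((m - 1).toNat + 1) := by
            have : (m - 1).toNat + 1 = m.toNat := by omega
            rw [this]; exact hmem
          obtain ⟨j, hj⟩ := ih (m - 1) (by omega) (by omega) (by omega) hmem'
          refine ⟨j, ?_⟩
          rw [rfindBracket, if_pos hm0, hget, if_neg (by simp [hb]), hj]
        · simp at hmem; exact absurd hmem.symm hb
      · subst hm1
        have h1 : rule.take ((0:Int).toNat + 1) = rule.take 0 ++ [rule[(0:Int).toNat]] := by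
          rw [List.take_succ, List.getElem?_eq_getElem (by omega)]
          rfl
        rw [h1] at hmem
        simp at hmem
        exact absurd hmem.symm hb

-- … hence wfFrom holds everywhere under Pre_'s bracket condition
theorem wfFrom_of_bracketCond (rule : List Char)
    (hc : ∀ p : Nat, (h : p < rule.length) → rule[p] = ']' → '[' ∈ rule.take p) :
    ∀ (n : Nat) (k : Int), (k + 1).toNat ≤ n → -1 ≤ k → k < (rule.length : Int) →
      wfFrom rule k = true := by
  intro n
  induction n with
  | zero =>
    intro k hn hk1 _
    have : k = -1 := by omega
    subst this
    rw [wfFrom, dif_neg (by omega)]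
  | succ n ih =>
    intro k hn hk1 hklen
    by_cases hk0 : 0 ≤ k
    · have hget : PySem.List.pyGet? rule k = some rule[k.toNat] :=
        PySem.List.pyGet?_eq_some_getElem rule hk0 hklen
      rw [wfFrom, dif_pos hk0]
      split
      next => rfl
      next c heq =>
        have hcc : c = rule[k.toNat] := by
          rw [hget] at heq; exact (Option.some.inj heq).symm
        by_cases hbr : c = ']'
        · have hmem : '[' ∈ rule.take k.toNat := hc k.toNat (by omega) (hcc ▸ hbr)
          rcases Nat.eq_zero_or_pos k.toNat with hz | hz
          · rw [hz] at hmem; simp at hmem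
          · have hmem' : '[' ∈ rule.take ((k - 1).toNat + 1) := by
              have heqn : (k - 1).toNat + 1 = k.toNat := by omega
              rw [heqn]; exact hmem
            obtain ⟨j, hj⟩ := rfindBracket_some_of_mem rule (rule.length + 1) (k - 1)
              (by omega) (by omega) (by omega) hmem'
            have hjb := rfindBracket_le rule (rule.length + 1) (k - 1) j hj
            rw [if_pos hbr]
            split
            next h0 => rw [hj] at h0; cases h0
            next j2 h0 =>
              rw [hj] at h0
              injection h0 with h0
              subst h0
              exact ih (j - 1) (by omega) (by omega) (by omega)
        · rw [if_neg hbr]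
          exact ih (k - 1) (by omega) (by omega) (by omega)
    · have : k = -1 := by omega
      subst this
      rw [wfFrom, dif_neg (by omega)]

-- the letters A's inner scan from position m down to the '[' at j collects (in its order)
def lettersOf (rule : List Char) (j m : Int) : List Char :=
  ((PySem.List.slice rule (some (j + 1)) (some (m + 1))).filter (· ≠ '^')).reverse

theorem slice_snoc (xs : List Char) (a b : Int) (h0 : 0 ≤ a) (hab : a ≤ b)
    (hb : b < (xs.length : Int)) :
    PySem.List.slice xs (some a) (some (b + 1)) =
      PySem.List.slice xs (some a) (some b) ++ [xs[b.toNat]] := by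
  rw [PySem.List.slice_toNat _ h0 (by omega), PySem.List.slice_toNat _ h0 (by omega)]
  have hb' : (b + 1).toNat = b.toNat + 1 := by omega
  rw [hb']
  have h1 : b.toNat + 1 - a.toNat = (b.toNat - a.toNat) + 1 := by omega
  rw [h1, List.take_succ]
  congr 1
  have : (xs.drop a.toNat)[b.toNat - a.toNat]? = some xs[b.toNat] := by
    rw [List.getElem?_drop]
    rw [List.getElem?_eq_getElem (by omega)]
    congr 1
    congr 1
    omega
  simp [this]

theorem scanA_rfind_aux (rule : List Char) :
    ∀ (fs fr : Nat) (m j : Int) (acc : List Char), (m + 1).toNat < fs →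
      m < (rule.length : Int) → rfindBracket rule fr m = some j →
      scanA rule fs m acc = some (j, acc ++ lettersOf rule j m) := by
  intro fs
  induction fs with
  | zero => intro fr m j acc hn _ _; omega
  | succ fs ih =>
    intro fr m j acc hn hm h
    cases fr with
    | zero => simp [rfindBracket] at h
    | succ fr =>
      have hm0 : 0 ≤ m := by
        by_contra hc
        rw [rfindBracket] at h; simp [hc] at h
      have hget : PySem.List.pyGet? rule m = some rule[m.toNat] :=
        PySem.List.pyGet?_eq_some_getElem rule hm0 hm
      rw [rfindBracket] at h
      simp only [hm0, if_true] at h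
      by_cases hb : PySem.List.pyGet? rule m = some '['
      · -- the scan stops right here; j = m, no letters
        simp only [hb, if_true, Option.some.injEq] at h
        subst h
        have hempty : lettersOf rule m m = [] := by
          unfold lettersOf
          have hsl : PySem.List.slice rule (some (m + 1)) (some (m + 1)) =
              (rule.drop (m + 1).toNat).take ((m + 1).toNat - (m + 1).toNat) :=
            PySem.List.slice_toNat rule (by omega) (by omega)
          simp [hsl]
        rw [scanA]
        split
        next heq => rw [hb] at heq; cases heq
        next c' heq =>
          rw [hb] at heq
          injection heq with heq
          subst heq
          simp [hempty]
      · simp only [hb, if_false] at h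
        have hc : rule[m.toNat] ≠ '[' := by
          intro hcc; rw [hget, hcc] at hb; exact hb rfl
        have hjm : 0 ≤ j ∧ j ≤ m - 1 := rfindBracket_le rule fr (m - 1) j h
        rw [scanA]
        split
        next heq => rw [hget] at heq; cases heq
        next c' heq =>
          rw [hget] at heq
          injection heq with heq
          subst heq
          rw [if_neg hc]
          rw [ih fr (m - 1) j _ (by omega) (by omega) h]
          congr 2
          have hsl : PySem.List.slice rule (some (j + 1)) (some (m + 1)) =
              PySem.List.slice rule (some (j + 1)) (some m) ++ [rule[m.toNat]] := by
            have := slice_snoc rule (j + 1) m (by omega) (by omega) hm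
            simpa using this
          unfold lettersOf
          rw [show m - 1 + 1 = m by ring, hsl, List.filter_append, List.reverse_append]
          by_cases hcar : rule[m.toNat] = '^'
          · simp [hcar]
          · simp [hcar]

theorem scanA_rfind (rule : List Char) (fs fr : Nat) (m j : Int)
    (hfs : (m + 1).toNat < fs) (hm : m < (rule.length : Int))
    (h : rfindBracket rule fr m = some j) :
    scanA rule fs m [] = some (j, lettersOf rule j m) := by
  have := scanA_rfind_aux rule fs fr m j [] hfs hm h
  simpa using this

-- proof-layer view of B's phase 2: like matchToks but guarding i < 0 per step,
-- the shape A's loop exit produces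
def goMatch (word : List Char) (ts : List TokB) (i : Int) : Bool :=
  match ts with
  | [] => true
  | t :: ts => if i < 0 then false else chkTok t (PySem.List.pyGet? word i) && goMatch word ts (i - 1)

theorem loopA_false (word rule : List Char) (fl : Nat) (k i : Int) :
    loopA word rule fl false k i = false := by
  cases fl with
  | zero => rfl
  | succ fl =>
    rw [loopA]
    have h : ¬ (false = true ∧ 0 ≤ k ∧ 0 ≤ i) := by simp
    rw [if_neg h]
    simp

theorem loopA_toks_aux (word rule : List Char) (n : Nat) :
    ∀ (k : Int), (k + 1).toNat ≤ n → -1 ≤ k → k < (rule.length : Int) →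
      wfFrom rule k = true →
      ∀ (ft : Nat), (k + 1).toNat < ft →
      ∃ ts, tokenizeB rule ft k = some ts ∧
        ∀ (i : Int) (fl : Nat), -1 ≤ i → (i + 1).toNat < fl →
          loopA word rule fl true k i = goMatch word ts i := by
  induction n with
  | zero =>
    intro k hn hk1 hklen hw ft hft
    have hk : k = -1 := by omega
    subst hk
    obtain ⟨ft', hft'⟩ : ∃ ft', ft = ft' + 1 := ⟨ft - 1, by omega⟩
    subst hft'
    refine ⟨[], by rw [tokenizeB]; simp, ?_⟩
    intro i fl hi hfl
    obtain ⟨fl', hfl'⟩ : ∃ fl', fl = fl' + 1 := ⟨fl - 1, by omega⟩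
    subst hfl'
    rw [loopA, if_neg (by omega), goMatch]
    simp
    omega
  | succ n ih =>
    intro k hn hk1 hklen hw ft hft
    obtain ⟨ft', hft'⟩ : ∃ ft', ft = ft' + 1 := ⟨ft - 1, by omega⟩
    subst hft'
    by_cases hk0 : 0 ≤ k
    · have hget : PySem.List.pyGet? rule k = some rule[k.toNat] :=
        PySem.List.pyGet?_eq_some_getElem rule hk0 hklen
      rw [wfFrom, dif_pos hk0] at hw
      split at hw
      next heq => rw [hget] at heq; cases heq
      next c heq =>
        have hc : c = rule[k.toNat] := by
          rw [hget] at heq; exact (Option.some.inj heq).symm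
        by_cases hbr : c = ']'
        · -- class token
          rw [if_pos hbr] at hw
          split at hw
          next => cases hw
          next j heq2 =>
            have hjb := rfindBracket_le rule (rule.length + 1) (k - 1) j heq2
            obtain ⟨ts', htok', hloop'⟩ :=
              ih (j - 1) (by omega) (by omega) (by omega) hw ft' (by omega)
            have hscan := scanA_rfind rule (2 * rule.length + 2) (rule.length + 1)
              (k - 1) j (by omega) (by omega) heq2
            refine ⟨TokB.cls (PySem.List.pyGet? rule (j + 1) = some '^')
                ((PySem.List.slice rule (some (j + 1)) (some k)).filter (· ≠ '^')) :: ts', ?_, ?_⟩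
            · rw [tokenizeB, if_pos hk0, heq]
              simp only [hbr, if_true]
              split
              next h0 => rw [heq2] at h0; cases h0
              next j2 h0 =>
                rw [heq2] at h0
                injection h0 with h0
                subst h0
                rw [htok']
                rfl
            · intro i fl hi hfl
              obtain ⟨fl', hfl'⟩ : ∃ fl', fl = fl' + 1 := ⟨fl - 1, by omega⟩
              subst hfl'
              by_cases hi0 : 0 ≤ i
              · rw [loopA, if_pos ⟨rfl, hk0, hi0⟩]
                rw [goMatch, if_neg (by omega)]
                cases hwg : PySem.List.pyGet? word i with
                | none => simp [heq, chkTok]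
                | some wc =>
                  simp only [heq]
                  rw [if_neg (by simp [hbr]), if_pos hbr, hscan]
                  have hmem : (lettersOf rule j (k - 1)).contains wc =
                      ((PySem.List.slice rule (some (j + 1)) (some k)).filter (· ≠ '^')).contains wc := by
                    unfold lettersOf
                    rw [show k - 1 + 1 = k by ring]
                    simp
                  by_cases hneg : PySem.List.pyGet? rule (j + 1) = some '^' <;>
                    by_cases hmemb : ((PySem.List.slice rule (some (j + 1)) (some k)).filter (· ≠ '^')).contains wc = true <;>
                      simp only [hneg, hmem, hmemb, chkTok] <;>
                        first
                          | simp [hneg, hmemb, loopA_false, hloop' (i - 1) fl' (by omega) (by omega)]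
                          | simp [loopA_false]
                          | simp [hloop' (i - 1) fl' (by omega) (by omega)]
              · have hi' : i = -1 := by omega
                rw [loopA, if_neg (by omega), goMatch, if_pos (by omega)]
                simp
                omega
        · -- literal or wildcard token
          rw [if_neg hbr] at hw
          obtain ⟨ts', htok', hloop'⟩ :=
            ih (k - 1) (by omega) (by omega) (by omega) hw ft' (by omega)
          refine ⟨(if c = '.' then TokB.any else TokB.lit c) :: ts', ?_, ?_⟩
          · rw [tokenizeB, if_pos hk0, heq]
            by_cases hdot : c = '.' <;> simp [hbr, hdot, htok']
          · intro i fl hi hfl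
            obtain ⟨fl', hfl'⟩ : ∃ fl', fl = fl' + 1 := ⟨fl - 1, by omega⟩
            subst hfl'
            by_cases hi0 : 0 ≤ i
            · rw [loopA, if_pos ⟨rfl, hk0, hi0⟩]
              rw [goMatch, if_neg (by omega)]
              cases hwg : PySem.List.pyGet? word i with
              | none =>
                simp [heq, chkTok]
              | some wc =>
                simp only [heq]
                by_cases hdot : c = '.'
                · rw [if_neg (by simp [hdot]), if_neg (by simp [hdot])]
                  simp only [hdot, chkTok]
                  simp [hloop' (i - 1) fl' (by omega) (by omega)]
                · rw [if_pos ⟨hbr, hdot⟩]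
                  simp only [chkTok, if_neg hdot]
                  by_cases hwc : wc = c
                  · simp [hwc, hloop' (i - 1) fl' (by omega) (by omega)]
                  · simp [hwc, loopA_false]
            · have hi' : i = -1 := by omega
              rw [loopA, if_neg (by omega), goMatch, if_pos (by omega)]
              simp
              omega
    · -- k = -1
      have hk : k = -1 := by omega
      subst hk
      refine ⟨[], by rw [tokenizeB]; simp, ?_⟩
      intro i fl hi hfl
      obtain ⟨fl', hfl'⟩ : ∃ fl', fl = fl' + 1 := ⟨fl - 1, by omega⟩
      subst hfl'
      rw [loopA, if_neg (by omega), goMatch]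
      simp
      omega

theorem goMatch_eq_matchToks (word : List Char) :
    ∀ (ts : List TokB) (i : Int), -1 ≤ i →
      goMatch word ts i =
        if i + 1 < (ts.length : Int) then false else matchToks word ts i := by
  intro ts
  induction ts with
  | nil =>
    intro i hi
    rw [goMatch, matchToks, if_neg (by simp; omega)]
  | cons t ts ih =>
    intro i hi
    rw [goMatch, matchToks]
    by_cases hi0 : i < 0
    · rw [if_pos hi0, if_pos (by simp; omega)]
    · rw [if_neg hi0, ih (i - 1) (by omega)]
      by_cases hlen : i < (ts.length : Int)
      · rw [if_pos (by omega), if_pos (by simp; omega)]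
        simp
      · rw [if_neg (by omega), if_neg (by simp; omega)]

theorem respectRuleSuffix_spec : Claim_equal_respectRuleSuffix := by
  unfold Claim_equal_respectRuleSuffix
  intro word rule _hdom hpre
  unfold Spec_respectRuleSuffix
  unfold Pre_respectRuleSuffix at hpre
  have hpre' : wfFrom rule.toList ((rule.toList.length : Int) - 1) = true :=
    wfFrom_of_bracketCond rule.toList hpre (((rule.toList.length : Int) - 1) + 1).toNat
      _ le_rfl (by omega) (by omega)
  obtain ⟨ts, htok, hloop⟩ :=
    loopA_toks_aux word.toList rule.toList (((rule.toList.length : Int) - 1) + 1).toNat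
      ((rule.toList.length : Int) - 1) le_rfl (by omega) (by omega) hpre'
      (rule.toList.length + 1) (by omega)
  have halt : respectRuleSuffix_alt word rule =
      (if (word.toList.length : Int) < (ts.length : Int) then false
       else matchToks word.toList ts ((word.toList.length : Int) - 1)) := by
    unfold respectRuleSuffix_alt
    rw [htok]
  rw [halt]
  unfold respectRuleSuffix
  rw [hloop ((word.toList.length : Int) - 1) (word.toList.length + 1) (by omega) (by omega),
    goMatch_eq_matchToks word.toList ts ((word.toList.length : Int) - 1) (by omega)]
  by_cases h : (word.toList.length : Int) < (ts.length : Int)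
  · rw [if_pos (by omega), if_pos h]
  · rw [if_neg (by omega), if_neg h]
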